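-- pv_equiv track=rewrite | github.com/jensenerik/aoc2022 | solutions/solution08.py | interior_visible
-- ===== SOURCE A (Python) =====
-- from typing import Dict, List, Set, Tuple
--
-- def interior_visible(view: Tuple[int, ...], tracker: int) -> Dict[Tuple[int, int], List[int]]:
--     int_visible: Dict[Tuple[int, int], List[int]] = dict()
--     for i, height in enumerate(view):
--         two_sided_visible = []
--         blocking = [(item >= height) for item in view]
--         left = list(reversed(blocking[:i]))
--         right = blocking[i + 1:]  # fmt: skip
--         for direction in [left, right]:
--             if True in direction:
--                 two_sided_visible.append(direction.index(True) + 1)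
--             else:
--                 two_sided_visible.append(len(direction))
--         int_visible[(i, tracker)] = two_sided_visible
--     return int_visible
-- ===== SOURCE B (Python) =====
-- def _pass(view):
--     # viewing distance towards lower indices: distance to nearest j < i with
--     # view[j] >= view[i], or i if no such tree exists; monotonic stack, O(n)
--     res = []
--     stack = []  # indices with non-decreasing heights towards the bottom
--     for i, h in enumerate(view):
--         while stack and view[stack[-1]] < h:
--             stack.pop()
--         res.append(i - stack[-1] if stack else i)
--         stack.append(i)
--     return res
--
--
-- def interior_visible(view, tracker):
--     left = _pass(view)
--     right = _pass(list(reversed(view)))[::-1]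
--     return {(i, tracker): [left[i], right[i]] for i in range(len(view))}
-- ===== Notes on version B (the rewrite author's own statement) =====
-- stated objective: faster
-- what changed: A rebuilds a full blocking list and scans two slices with list.index for every tree (O(n) work per tree); B computes all viewing distances with two monotonic-stack passes (one per direction), O(n) total.
import Mathlib
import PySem

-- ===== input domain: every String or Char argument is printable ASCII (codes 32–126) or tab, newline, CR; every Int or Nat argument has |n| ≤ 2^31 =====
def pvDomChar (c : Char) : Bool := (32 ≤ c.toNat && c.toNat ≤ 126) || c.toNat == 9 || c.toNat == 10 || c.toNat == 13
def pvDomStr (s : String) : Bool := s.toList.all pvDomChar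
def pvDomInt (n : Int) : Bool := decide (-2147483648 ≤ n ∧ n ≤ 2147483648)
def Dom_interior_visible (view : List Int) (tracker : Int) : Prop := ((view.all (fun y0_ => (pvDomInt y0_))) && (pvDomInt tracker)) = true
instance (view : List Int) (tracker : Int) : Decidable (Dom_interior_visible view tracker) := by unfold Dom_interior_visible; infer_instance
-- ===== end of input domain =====

-- B replaces A's per-tree scans (a full blocking list, two slices, list.index for every
-- tree) by two monotonic-stack passes over the list; same return value everywhere.

-- ===== PORT A =====
-- literal transliteration of A; the dict with (i, tracker) keys is the assoc list
-- `items`, flattened to the required List (Int × Int × List Int) shape at the end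
def interior_visible (view : List Int) (tracker : Int) : List (Int × Int × List Int) :=
  ((PySem.List.enumerate view).foldl
    (fun (int_visible : PySem.Dict (Int × Int) (List Int)) p =>
      let i := p.1
      let height := p.2
      let blocking := view.map (fun item => decide (height ≤ item))
      let left := (PySem.List.slice blocking none (some i)).reverse
      let right := PySem.List.slice blocking (some (i + 1)) none
      let two_sided_visible := [left, right].foldl
        (fun acc direction =>
          if direction.contains true then
            acc ++ [(((PySem.List.index? direction true).getD 0 : Nat) : Int) + 1]
          else
            acc ++ [(direction.length : Int)])
        []
      int_visible.insert (i, tracker) two_sided_visible)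
    PySem.Dict.empty).items.map (fun e => (e.1.1, e.1.2, e.2))

-- ===== PORT B =====
-- Source B's _pass: one monotonic-stack sweep.  The Python stack keeps its top at the END
-- of the list; this port stores the same stack with the top at the HEAD
-- (stack[-1] ↔ head?, append ↔ cons, the pop-while loop ↔ dropWhile); stack entries
-- are always in-range non-negative indices, so pyGetD is exact there
def pyPass (view : List Int) : List Int :=
  ((PySem.List.enumerate view).foldl
    (fun (st : List Int × List Int) p =>
      let stack := st.2.dropWhile (fun j => PySem.List.pyGetD view j 0 < p.2)
      (st.1 ++ [match stack.head? with
                | some j => p.1 - j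
                | none => p.1],
       p.1 :: stack))
    ([], [])).1

def interior_visible_alt (view : List Int) (tracker : Int) : List (Int × Int × List Int) :=
  let left := pyPass view
  let right := (pyPass view.reverse).reverse
  (List.range view.length).map (fun (i : Nat) => ((i : Int), tracker, [left.getD i 0, right.getD i 0]))

-- ===== PRECONDITION & SPEC =====
def Spec_interior_visible (view : List Int) (tracker : Int) (out : List (Int × Int × List Int)) : Prop := out = interior_visible_alt view tracker
instance (view : List Int) (tracker : Int) (out : List (Int × Int × List Int)) : Decidable (Spec_interior_visible view tracker out) := by unfold Spec_interior_visible; infer_instance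

-- ===== CLAIM (what is proved, stated in full; the proofs are below) =====
def Claim_equal_interior_visible : Prop := ∀ (view : List Int) (tracker : Int), Dom_interior_visible view tracker → Spec_interior_visible view tracker (interior_visible view tracker)

-- ===== LEMMAS AND PROOFS =====
def gV (v : List Int) (j : Nat) : Int := v.getD j 0
def stk (v : List Int) (i : Nat) : List Nat :=
  ((List.range i).reverse).filter (fun j => decide (∀ k < i, j < k → gV v k ≤ gV v j))

lemma mem_stk {v : List Int} {i j : Nat} :
    j ∈ stk v i ↔ j < i ∧ ∀ k < i, j < k → gV v k ≤ gV v j := by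
  simp [stk, List.mem_filter, List.mem_reverse, List.mem_range]

lemma stk_gt (v : List Int) (i : Nat) : (stk v i).Pairwise (· > ·) := by
  apply List.Pairwise.filter
  exact List.pairwise_reverse.mpr (by simpa using List.pairwise_lt_range)

lemma stk_mono (v : List Int) (i : Nat) :
    (stk v i).Pairwise (fun a b => gV v a ≤ gV v b) := by
  refine List.Pairwise.imp_of_mem ?_ (stk_gt v i)
  intro a b ha hb hab
  rcases mem_stk.mp ha with ⟨hai, _⟩
  rcases mem_stk.mp hb with ⟨_, hbchar⟩
  exact hbchar a hai hab

lemma filter_eq_dropWhile_mono {α : Type} (p : α → Bool) :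
    ∀ l : List α, l.Pairwise (fun a b => p a = true → p b = true) →
      l.filter p = l.dropWhile (fun x => !p x) := by
  intro l hl
  induction l with
  | nil => rfl
  | cons x xs ih =>
    rcases List.pairwise_cons.mp hl with ⟨hx, hxs⟩
    by_cases h : p x = true
    · simp [List.filter_cons, List.dropWhile_cons, h,
        List.filter_eq_self.mpr (fun y hy => hx y hy h)]
    · simp [List.filter_cons, List.dropWhile_cons, h, ih hxs]

lemma findIdx?_rev_range (q : Nat → Bool) (i : Nat) :
    ((List.range i).reverse).findIdx? q =
      (((List.range i).reverse).find? q).map (fun j => i - 1 - j) := by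
  induction i with
  | zero => simp
  | succ n ih =>
    rw [List.range_succ, List.reverse_append]
    simp only [List.reverse_cons, List.reverse_nil, List.nil_append, List.cons_append,
      List.findIdx?_cons, List.find?_cons]
    by_cases h : q n = true
    · simp [h]
    · simp only [h, Bool.false_eq_true, if_false, cond_false, ih]
      cases hf : (List.range n).reverse.find? q with
      | none => simp
      | some j =>
        have hj : j < n := by
          have hm := List.mem_of_find?_eq_some hf
          simpa using hm
        simp [Option.map_map]
        omega

lemma take_eq_map_range {v : List Int} {i : Nat} (h : i ≤ v.length) :
    v.take i = (List.range i).map (fun j => gV v j) := by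
  apply List.ext_getElem
  · simpa using h
  · intro k h1 h2
    simp at h1 h2 ⊢
    simp [gV, List.getD_eq_getElem?_getD, List.getElem?_eq_getElem (by omega : k < v.length)]

lemma enumerate_eq_map_range (v : List Int) :
    PySem.List.enumerate v = (List.range v.length).map (fun (i : Nat) => ((i : Int), gV v i)) := by
  apply List.ext_getElem?
  intro k
  rw [PySem.List.getElem?_enumerate]
  by_cases h : k < v.length
  · simp [List.getElem?_eq_getElem, h, gV, List.getD_eq_getElem?_getD,
      List.getElem?_eq_getElem (h)]
  · simp [List.getElem?_eq_none, h, Nat.le_of_not_lt h]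

lemma scan_val (p : Int → Bool) (w : List Int) :
    (if (w.map p).contains true then
       (((PySem.List.index? (w.map p) true).getD 0 : Nat) : Int) + 1
     else ((w.map p).length : Int))
    = (match w.findIdx? p with
       | some k => (k : Int) + 1
       | none => (w.length : Int)) := by
  induction w with
  | nil => simp [PySem.List.index?]
  | cons a w ih =>
    by_cases h : p a = true
    · simp [List.findIdx?_cons, h, PySem.List.index?, List.idxOf?]
    · cases hf : w.findIdx? p with
      | none =>
        have hcons : (a :: w).findIdx? p = none := by
          rw [List.findIdx?_cons]; simp [h, hf]
        have hc : (List.map p (a :: w)).contains true = false := by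
          rw [List.findIdx?_eq_none_iff] at hcons
          simp only [List.contains_eq_any_beq, List.any_eq_false]
          intro x hx
          rcases List.mem_map.mp hx with ⟨y, hy, rfl⟩
          simpa using hcons y hy
        simp only [List.map_cons] at hc
        rw [hcons, List.map_cons, if_neg (by rw [hc]; exact Bool.false_ne_true)]
        simp
      | some k =>
        have hcons : (a :: w).findIdx? p = some (k + 1) := by
          rw [List.findIdx?_cons]; simp [h, hf]
        have hid : ((fun x : Bool => x) ∘ p) = p := by funext y; simp
        have hidx : PySem.List.index? (List.map p (a :: w)) true = some (k + 1) := by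
          simp [PySem.List.index?, List.idxOf?, List.findIdx?_cons, List.findIdx?_map,
            Function.comp, h, hid, hf]
        have hmem : true ∈ List.map p (a :: w) := by
          have h1 : List.idxOf? true (List.map p (a :: w)) = some (k + 1) := by
            simpa [PySem.List.index?] using hidx
          exact List.isSome_idxOf?.mp (by rw [h1]; rfl)
        have hc : (List.map p (a :: w)).contains true = true := by simpa using hmem
        simp only [List.map_cons] at hc hidx
        rw [hcons, List.map_cons, if_pos hc, hidx]
        simp

def findRR (v : List Int) (i : Nat) : Option Nat :=
  ((List.range i).reverse).find? (fun j => decide (gV v i ≤ gV v j))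

lemma stk_succ (v : List Int) (i : Nat) :
    stk v (i + 1) = i :: (stk v i).dropWhile (fun j => decide (gV v j < gV v i)) := by
  have h1 : stk v (i + 1) = i :: ((List.range i).reverse).filter
      (fun j => decide (∀ k < i + 1, j < k → gV v k ≤ gV v j)) := by
    rw [stk, List.range_succ, List.reverse_append]
    simp only [List.reverse_cons, List.reverse_nil, List.nil_append, List.cons_append,
      List.filter_cons]
    rw [if_pos (by simp only [decide_eq_true_eq]; intro k hk hik; omega)]
  rw [h1]
  congr 1
  have h2 : ((List.range i).reverse).filter
      (fun j => decide (∀ k < i + 1, j < k → gV v k ≤ gV v j))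
      = (stk v i).filter (fun j => decide (gV v i ≤ gV v j)) := by
    rw [stk, List.filter_filter]
    apply List.filter_congr
    intro j hj
    have hji : j < i := by simpa using List.mem_reverse.mp hj
    rw [← Bool.decide_and]
    apply decide_eq_decide.mpr
    constructor
    · intro hall
      exact ⟨hall i (by omega) hji, fun k hk hjk => hall k (by omega) hjk⟩
    · rintro ⟨hgi, hchar⟩ k hk hjk
      rcases Nat.lt_succ_iff_lt_or_eq.mp hk with hk' | rfl
      · exact hchar k hk' hjk
      · exact hgi
  rw [h2, filter_eq_dropWhile_mono _ _
    ((stk_mono v i).imp (fun hab hle => by simp only [decide_eq_true_eq] at hle ⊢; omega))]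
  congr 1
  funext j
  rw [← decide_not]
  exact decide_eq_decide.mpr Int.not_le

lemma top_eq_find (v : List Int) (i : Nat) :
    ((stk v i).dropWhile (fun j => decide (gV v j < gV v i))).head? = findRR v i := by
  have hdw : (stk v i).dropWhile (fun j => decide (gV v j < gV v i))
      = (stk v i).filter (fun j => decide (gV v i ≤ gV v j)) := by
    rw [filter_eq_dropWhile_mono _ _
      ((stk_mono v i).imp (fun hab hle => by simp only [decide_eq_true_eq] at hle ⊢; omega))]
    congr 1
    funext j
    rw [← decide_not]
    exact decide_eq_decide.mpr Int.not_le.symm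
  rw [hdw, stk, List.filter_filter, List.head?_filter, findRR]
  cases hf : ((List.range i).reverse).find? (fun j => decide (gV v i ≤ gV v j)) with
  | none =>
    rw [List.find?_eq_none] at hf ⊢
    intro j hj
    simp only [Bool.and_eq_true, not_and]
    intro hp
    exact absurd hp (hf j hj)
  | some j =>
    rcases List.find?_eq_some_iff_append.mp hf with ⟨hpj, as, bs, hsplit, hfail⟩
    have hpair : ((List.range i).reverse).Pairwise (· > ·) :=
      List.pairwise_reverse.mpr (by simpa using List.pairwise_lt_range)
    rw [hsplit] at hpair
    rcases List.pairwise_append.mp hpair with ⟨_, hpj2, hcross⟩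
    have hchar : ∀ k < i, j < k → gV v k ≤ gV v j := by
      intro k hk hjk
      have hkmem : k ∈ as ++ j :: bs := by
        rw [← hsplit]; simp [hk]
      have hkas : k ∈ as := by
        rcases List.mem_append.mp hkmem with h | h
        · exact h
        · rcases List.mem_cons.mp h with rfl | h
          · omega
          · exact absurd (List.rel_of_pairwise_cons hpj2 h) (by omega)
      have := hfail k hkas
      simp only [decide_eq_true_eq] at hpj this ⊢
      simp at this
      omega
    rw [hsplit, List.find?_append]
    have h1 : as.find? (fun j => decide (gV v i ≤ gV v j) && decide (∀ k < i, j < k → gV v k ≤ gV v j)) = none := by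
      rw [List.find?_eq_none]
      intro a ha
      have := hfail a ha
      simp only [Bool.and_eq_true, not_and]
      intro hp
      simp at this
      exact absurd (by simpa using hp) (by simpa using this)
    rw [h1, Option.none_or, List.find?_cons]
    have hcond : (decide (gV v i ≤ gV v j) && decide (∀ k < i, j < k → gV v k ≤ gV v j)) = true := by
      simp only [Bool.and_eq_true]
      exact ⟨hpj, by simpa using hchar⟩
    rw [hcond]

def nearL (v : List Int) (i : Nat) : Int :=
  match ((v.take i).reverse).findIdx? (fun x => decide (gV v i ≤ x)) with
  | some k => (k : Int) + 1
  | none => (i : Int)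

lemma nearL_eq_match_find {v : List Int} {i : Nat} (h : i ≤ v.length) :
    nearL v i = (match findRR v i with
                 | some j => (i : Int) - (j : Int)
                 | none => (i : Int)) := by
  rw [nearL, take_eq_map_range h, ← List.map_reverse, List.findIdx?_map]
  have hcomp : ((fun x => decide (gV v i ≤ x)) ∘ fun j => gV v j)
      = fun j => decide (gV v i ≤ gV v j) := rfl
  rw [hcomp, findIdx?_rev_range]
  simp only [findRR]
  cases hf : ((List.range i).reverse).find? (fun j => decide (gV v i ≤ gV v j)) with
  | none => simp [hf]
  | some j =>
    have hj : j < i := by simpa using List.mem_of_find?_eq_some hf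
    simp only [hf, Option.map_some]
    rw [Nat.sub_sub, Nat.cast_sub (by omega : 1 + j ≤ i)]
    push_cast
    ring


lemma pass_spec (v : List Int) :
    pyPass v = (List.range v.length).map (fun i => nearL v i) := by
  rw [pyPass, enumerate_eq_map_range, List.foldl_map]
  have key : ∀ m, m ≤ v.length →
      List.foldl
        (fun (st : List Int × List Int) (i : Nat) =>
          let stack := st.2.dropWhile (fun j => PySem.List.pyGetD v j 0 < gV v i)
          (st.1 ++ [match stack.head? with
                    | some j => (i : Int) - j
                    | none => (i : Int)],
           (i : Int) :: stack))
        ([], []) (List.range m)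
      = ((List.range m).map (fun i => nearL v i),
         (stk v m).map (Nat.cast : Nat → Int)) := by
    intro m hm
    induction m with
    | zero => simp [stk]
    | succ m ih =>
      rw [List.range_succ, List.foldl_append, ih (by omega)]
      simp only [List.foldl_cons, List.foldl_nil]
      have hdwm : ((stk v m).map (Nat.cast : Nat → Int)).dropWhile
            (fun j => decide (PySem.List.pyGetD v j 0 < gV v m))
          = ((stk v m).dropWhile
              (fun j => decide (gV v j < gV v m))).map (Nat.cast : Nat → Int) := by
        rw [List.dropWhile_map]
        have hfun : ((fun j => decide (PySem.List.pyGetD v j 0 < gV v m)) ∘ (Nat.cast : Nat → Int))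
            = (fun j => decide (gV v j < gV v m)) := by
          funext j
          simp [Function.comp, PySem.List.pyGetD_natCast, gV]
        rw [hfun]
      rw [hdwm, Prod.mk.injEq]
      refine ⟨?_, ?_⟩
      · rw [List.map_append]
        congr 1
        rw [List.head?_map, top_eq_find]
        simp only [List.map_cons, List.map_nil]
        rw [nearL_eq_match_find (show m ≤ v.length by omega)]
        cases hf : findRR v m <;> simp [hf]
      · rw [← List.map_cons, ← stk_succ]
  exact congrArg Prod.fst (key v.length le_rfl)

def nearR (v : List Int) (i : Nat) : Int :=
  match (v.drop (i + 1)).findIdx? (fun x => decide (gV v i ≤ x)) with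
  | some k => (k : Int) + 1
  | none => ((v.length - (i + 1) : Nat) : Int)

lemma nearR_eq_rev {v : List Int} {i : Nat} (h : i < v.length) :
    nearL v.reverse (v.length - 1 - i) = nearR v i := by
  have hg : gV v.reverse (v.length - 1 - i) = gV v i := by
    have hlt : v.length - 1 - i < v.length := by omega
    show v.reverse.getD (v.length - 1 - i) 0 = v.getD i 0
    rw [List.getD_reverse _ (by simpa using hlt)]
    congr 1
    omega
  have hlist : (v.reverse.take (v.length - 1 - i)).reverse = v.drop (i + 1) := by
    rw [List.take_reverse, List.reverse_reverse]
    congr 1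
    omega
  rw [nearL, nearR, hlist, hg]
  cases hf : (v.drop (i + 1)).findIdx? (fun x => decide (gV v i ≤ x)) with
  | none => simp; omega
  | some k => simp


lemma A_eq (v : List Int) (t : Int) :
    interior_visible v t =
      (List.range v.length).map (fun (i : Nat) => ((i : Int), t, [nearL v i, nearR v i])) := by
  rw [interior_visible, enumerate_eq_map_range, List.foldl_map]
  have key : ∀ m, m ≤ v.length →
      (List.foldl
        (fun (int_visible : PySem.Dict (Int × Int) (List Int)) (i : Nat) =>
          let blocking := v.map (fun item => decide (gV v i ≤ item))
          let left := (PySem.List.slice blocking none (some (i : Int))).reverse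
          let right := PySem.List.slice blocking (some ((i : Int) + 1)) none
          let two_sided_visible := [left, right].foldl
            (fun acc direction =>
              if direction.contains true then
                acc ++ [(((PySem.List.index? direction true).getD 0 : Nat) : Int) + 1]
              else
                acc ++ [(direction.length : Int)])
            []
          int_visible.insert ((i : Int), t) two_sided_visible)
        PySem.Dict.empty (List.range m))
      = ⟨(List.range m).map (fun (i : Nat) => (((i : Int), t), [nearL v i, nearR v i]))⟩ := by
    intro m hm
    induction m with
    | zero => rfl
    | succ m ih =>
      rw [List.range_succ, List.foldl_append, ih (by omega)]
      simp only [List.foldl_cons, List.foldl_nil]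
      -- the freshly inserted key (m, t) is not among the keys (j, t), j < m
      have hcontains : (PySem.Dict.contains
          (⟨(List.range m).map (fun (i : Nat) => (((i : Int), t), [nearL v i, nearR v i]))⟩ :
            PySem.Dict (Int × Int) (List Int)) ((m : Int), t)) = false := by
        simp only [PySem.Dict.contains, List.any_eq_false]
        rintro ⟨k, val⟩ hmem
        rcases List.mem_map.mp hmem with ⟨j, hj, hje⟩
        have hjm : j < m := List.mem_range.mp hj
        cases hje
        simp only [beq_iff_eq, Prod.mk.injEq, not_and]
        intro hcast
        exact absurd (Nat.cast_injective hcast) (by omega)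
      have hone : ∀ (d : List Bool) (acc : List Int),
          (if d.contains true then
             acc ++ [(((PySem.List.index? d true).getD 0 : Nat) : Int) + 1]
           else acc ++ [(d.length : Int)])
          = acc ++ [if d.contains true then
                      (((PySem.List.index? d true).getD 0 : Nat) : Int) + 1
                    else (d.length : Int)] := by
        intro d acc
        split <;> rfl
      rw [hone, hone]
      have hvL : (if ((PySem.List.slice (v.map (fun item => decide (gV v m ≤ item))) none
              (some (m : Int))).reverse).contains true then
            (((PySem.List.index? ((PySem.List.slice (v.map (fun item => decide (gV v m ≤ item))) none
              (some (m : Int))).reverse) true).getD 0 : Nat) : Int) + 1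
          else (((PySem.List.slice (v.map (fun item => decide (gV v m ≤ item))) none
              (some (m : Int))).reverse).length : Int)) = nearL v m := by
        have hleft : (PySem.List.slice (v.map (fun item => decide (gV v m ≤ item))) none
              (some (m : Int))).reverse
            = ((v.take m).reverse).map (fun item => decide (gV v m ≤ item)) := by
          rw [PySem.List.slice_to _ (Int.natCast_nonneg m), Int.toNat_natCast,
            ← List.map_take, ← List.map_reverse]
        rw [hleft, scan_val, nearL]
        cases hf : ((v.take m).reverse).findIdx? (fun x => decide (gV v m ≤ x)) with
        | none =>
          simp only [hf, List.length_reverse, List.length_take]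
          congr 1
          omega
        | some k => simp [hf]
      have hvR : (if ((PySem.List.slice (v.map (fun item => decide (gV v m ≤ item)))
              (some ((m : Int) + 1)) none)).contains true then
            (((PySem.List.index? ((PySem.List.slice (v.map (fun item => decide (gV v m ≤ item)))
              (some ((m : Int) + 1)) none)) true).getD 0 : Nat) : Int) + 1
          else (((PySem.List.slice (v.map (fun item => decide (gV v m ≤ item)))
              (some ((m : Int) + 1)) none)).length : Int)) = nearR v m := by
        have hright : PySem.List.slice (v.map (fun item => decide (gV v m ≤ item)))
              (some ((m : Int) + 1)) none
            = (v.drop (m + 1)).map (fun item => decide (gV v m ≤ item)) := by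
          rw [PySem.List.slice_from _ (by positivity), List.map_drop]
          congr 1
        rw [hright, scan_val, nearR]
        cases hf : (v.drop (m + 1)).findIdx? (fun x => decide (gV v m ≤ x)) with
        | none => simp
        | some k => simp
      rw [hvL, hvR]
      rw [PySem.Dict.insert, if_neg (by rw [hcontains]; exact Bool.false_ne_true)]
      simp only [List.nil_append]
      congr 1
      simp
  have hfin := key v.length le_rfl
  rw [hfin]
  rw [List.map_map]
  rfl


lemma B_eq (v : List Int) (t : Int) :
    interior_visible_alt v t =
      (List.range v.length).map (fun (i : Nat) => ((i : Int), t, [nearL v i, nearR v i])) := by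
  rw [interior_visible_alt]
  apply List.map_congr_left
  intro i hi
  have hi' : i < v.length := List.mem_range.mp hi
  have hleft : (pyPass v).getD i 0 = nearL v i := by
    rw [pass_spec, PySem.List.getD_map_range _ _ _ _ hi']
  have hright : ((pyPass v.reverse).reverse).getD i 0 = nearR v i := by
    rw [pass_spec]
    have hlen : (List.map (fun i => nearL v.reverse i) (List.range v.reverse.length)).length
        = v.length := by simp
    rw [List.getD_reverse _ (by rw [hlen]; exact hi'), hlen]
    rw [PySem.List.getD_map_range _ _ _ _ (by simp; omega)]
    rw [nearR_eq_rev hi']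
  rw [hleft, hright]

-- ===== VERDICT (by name: the statement is the Claim_ definition above) =====
theorem interior_visible_spec : Claim_equal_interior_visible := by
  intro view tracker _
  unfold Spec_interior_visible
  rw [A_eq, B_eq]
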